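-- pv_equiv track=rewrite | github.com/laurasg-03/Uni-projects-part-1 | Algoritmos, estructuras de datos y aprendizaje automatico- Python/PRÁCTICA 2/mri.py | cgen
-- ===== SOURCE A (Python) =====
-- def transition(lim1, lim2):
--     lst = []
--     if lim2 >= lim1:
--         for k in range(lim1+1,lim2):
--             lst = lst + [k]
--     else:
--         for k in range(lim1-1,lim2,-1):
--             lst = lst + [k]
--     return lst
--
-- def cgen(n):
--     cols = [0]
--     stay = 2
--     lim = 1
--
--     while len(cols) < n:
--         cols = cols + stay*[lim] #dostay(lim, stay)
--         if lim > 0: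
--             newlim = -lim
--         else:
--             newlim = -(lim-1)
--         cols = cols + transition(lim, newlim)
--         lim = newlim
--         stay = stay + 1
--     return cols[:n]
-- ===== SOURCE B (Python) =====
-- def cgen(n):
--     # per-index closed formula: index i lies in block m (the largest m with m*m <= i);
--     # within block m the first m+1 slots hold the extreme (-1)^(m+1)*((m+1)//2) and the
--     # remaining m slots step back toward zero and beyond; m is tracked incrementally.
--     out = []
--     m = 0
--     for i in range(n):
--         if (m + 1) * (m + 1) <= i:
--             m += 1
--         sign = -1 if m % 2 == 0 else 1
--         r = i - m * m
--         v = sign * ((m + 1) // 2)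
--         if r > m:
--             v -= sign * (r - m)
--         out.append(v)
--     return out
-- ===== Notes on version B (the rewrite author's own statement) =====
-- stated objective: faster
-- what changed: A is a block-emitting state machine (stay/lim/newlim) that appends each plateau and transition run by quadratic 'cols = cols + ...' concatenation and truncates at the end; B never emits blocks: it loops once over the output indices and computes each element directly from its index by a closed per-index formula (block number m = the largest m with m*m <= i, tracked incrementally), appending exactly n elements.
import Mathlib
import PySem

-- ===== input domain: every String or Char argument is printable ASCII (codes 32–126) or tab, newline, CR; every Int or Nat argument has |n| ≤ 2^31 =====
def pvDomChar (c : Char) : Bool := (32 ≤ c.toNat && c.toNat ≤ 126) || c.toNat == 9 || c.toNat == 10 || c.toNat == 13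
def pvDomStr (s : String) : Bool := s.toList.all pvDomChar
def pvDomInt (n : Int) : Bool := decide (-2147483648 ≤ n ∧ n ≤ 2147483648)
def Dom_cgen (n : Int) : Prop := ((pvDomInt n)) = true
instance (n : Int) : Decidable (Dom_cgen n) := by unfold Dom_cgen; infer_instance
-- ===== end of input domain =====

-- B replaces A's block-emitting state machine (quadratic 'cols = cols + ...' concatenation,
-- truncated at the end) by a single pass over output indices computing each element directly
-- from its index via a per-index formula (objective: faster).

-- ===== PORT A =====
-- helper 'transition' of A: builds the strictly-between range by repeated 'lst = lst + [k]'
def transition (lim1 lim2 : Int) : List Int :=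
  if lim2 ≥ lim1 then
    (PySem.List.pyRange (lim1 + 1) lim2 1).foldl (fun lst k => lst ++ [k]) []
  else
    (PySem.List.pyRange (lim1 - 1) lim2 (-1)).foldl (fun lst k => lst ++ [k]) []

-- A's while-loop; the invariant 1 ≤ stay (Python starts at 2 and only increments) makes it total
def cgenLoop (n : Int) (cols : List Int) (stay lim : Int) (hstay : 1 ≤ stay) : List Int :=
  if h : (cols.length : Int) < n then
    let cols1 := cols ++ List.replicate stay.toNat lim     -- cols = cols + stay*[lim]
    let newlim := if 0 < lim then -lim else -(lim - 1)
    let cols2 := cols1 ++ transition lim newlim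
    cgenLoop n cols2 (stay + 1) newlim (by omega)
  else cols
termination_by (n - cols.length).toNat
decreasing_by
  simp only [List.length_append, List.length_replicate]
  omega

def cgen (n : Int) : List Int :=
  PySem.List.slice (cgenLoop n [0] 2 1 (by norm_num)) none (some n)   -- cols[:n]

-- ===== PORT B =====
-- one iteration of B's for-loop: maybe advance the block index m, then compute out[i] from (m, i)
def cgenAltStep (st : List Int × Int) (i : Int) : List Int × Int :=
  let m := if (st.2 + 1) * (st.2 + 1) ≤ i then st.2 + 1 else st.2
  let sign : Int := if PySem.Int.mod m 2 = 0 then -1 else 1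
  let r := i - m * m
  let v0 := sign * PySem.Int.floordiv (m + 1) 2
  let v := if r > m then v0 - sign * (r - m) else v0
  (st.1 ++ [v], m)

def cgen_alt (n : Int) : List Int :=
  ((PySem.List.pyRange 0 n 1).foldl cgenAltStep ([], 0)).1

-- ===== PRECONDITION & SPEC =====
def Spec_cgen (n : Int) (out : List Int) : Prop := out = cgen_alt n
instance (n : Int) (out : List Int) : Decidable (Spec_cgen n out) := by unfold Spec_cgen; infer_instance

-- ===== CLAIM (what is proved, stated in full; the proofs are below) =====
def Claim_equal_cgen : Prop := ∀ (n : Int), Dom_cgen n → Spec_cgen n (cgen n)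

-- ===== LEMMAS AND PROOFS =====

-- the value B computes at index i when the tracked block index is m
def gval (m i : Int) : Int :=
  let sign : Int := if PySem.Int.mod m 2 = 0 then -1 else 1
  let r := i - m * m
  let v0 := sign * PySem.Int.floordiv (m + 1) 2
  if r > m then v0 - sign * (r - m) else v0

-- reference: the i-th element of the zigzag sequence, via the block index Nat.sqrt i
def fref (i : Nat) : Int := gval (Nat.sqrt i) i

-- the extreme value of block m (A's 'lim' when entering block m)
def limN (m : Nat) : Int := (if m % 2 = 0 then (-1 : Int) else 1) * ((m + 1) / 2 : Nat)

lemma sqrt_interval (m t : Nat) (h : t ≤ 2 * m) : Nat.sqrt (m * m + t) = m := by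
  have h1 : m ≤ Nat.sqrt (m * m + t) := Nat.le_sqrt.2 (by nlinarith)
  have h2 : Nat.sqrt (m * m + t) < m + 1 := by rw [Nat.sqrt_lt]; nlinarith
  omega

lemma gval_nat (m t : Nat) :
    gval (m : Int) ((m * m + t : Nat) : Int) =
      if (t : Int) > m then limN m - (if m % 2 = 0 then (-1 : Int) else 1) * ((t : Int) - m)
      else limN m := by
  unfold gval limN
  have hmod : PySem.Int.mod (m : Int) 2 = ((m % 2 : Nat) : Int) := PySem.Int.mod_natCast m 2
  have hfd : PySem.Int.floordiv ((m : Int) + 1) 2 = (((m + 1) / 2 : Nat) : Int) := by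
    have := PySem.Int.floordiv_natCast (m + 1) 2
    push_cast at this ⊢; omega
  have hr : ((m * m + t : Nat) : Int) - (m : Int) * m = (t : Int) := by push_cast; ring
  simp only [hmod, hfd, hr]
  rcases Nat.mod_two_eq_zero_or_one m with hp | hp <;>
    simp only [hp, Nat.cast_zero, Nat.cast_one] <;> norm_num

lemma fref_plateau (m t : Nat) (ht : t ≤ m) : fref (m * m + t) = limN m := by
  unfold fref
  rw [sqrt_interval m t (by omega), gval_nat m t]
  have : ¬ ((t : Int) > m) := by omega
  simp [this]

lemma fref_desc (m j : Nat) (h1 : 1 ≤ j) (h2 : j ≤ m) :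
    fref (m * m + (m + j)) = limN m - (if m % 2 = 0 then (-1 : Int) else 1) * j := by
  unfold fref
  rw [sqrt_interval m (m + j) (by omega), gval_nat m (m + j)]
  have : ((m + j : Nat) : Int) > m := by push_cast; omega
  simp only [this, if_pos]
  push_cast; ring_nf

-- A's newlim update sends limN m to limN (m+1)
lemma newlim_eq (m : Nat) (hm : 1 ≤ m) :
    (if 0 < limN m then -(limN m) else -(limN m - 1)) = limN (m + 1) := by
  rcases Nat.even_or_odd m with ⟨k, hk⟩ | ⟨k, hk⟩ <;> subst hk
  · have hA : limN (k + k) = -(k : Int) := by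
      unfold limN
      have h1 : (k + k) % 2 = 0 := by omega
      have h2 : (k + k + 1) / 2 = k := by omega
      simp [h1, h2]
    have hB : limN (k + k + 1) = (k : Int) + 1 := by
      unfold limN
      have h1 : (k + k + 1) % 2 = 1 := by omega
      have h2 : (k + k + 1 + 1) / 2 = k + 1 := by omega
      simp [h1, h2]
    rw [hA, hB]
    split_ifs <;> omega
  · have hA : limN (2 * k + 1) = (k : Int) + 1 := by
      unfold limN
      have h1 : (2 * k + 1) % 2 = 1 := by omega
      have h2 : (2 * k + 1 + 1) / 2 = k + 1 := by omega
      simp [h1, h2]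
    have hB : limN (2 * k + 1 + 1) = -((k : Int) + 1) := by
      unfold limN
      have h1 : (2 * k + 1 + 1) % 2 = 0 := by omega
      have h2 : (2 * k + 1 + 1 + 1) / 2 = k + 1 := by omega
      simp [h1, h2]
    rw [hA, hB]
    split_ifs <;> omega

-- block m of A's output, elementwise in terms of fref: the plateau part
lemma plateau_eq (m : Nat) (hm : 1 ≤ m) :
    List.replicate (((m : Int) + 1)).toNat (limN m) = (List.range' (m * m) (m + 1)).map fref := by
  have hlen : (((m : Int) + 1)).toNat = m + 1 := by omega
  rw [hlen, List.range'_eq_map_range, List.map_map]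
  symm
  apply List.eq_replicate_iff.2
  constructor
  · simp
  · intro b hb
    simp only [List.mem_map, List.mem_range] at hb
    obtain ⟨t, ht, rfl⟩ := hb
    exact fref_plateau m t (by omega)

-- the transition part of block m
lemma transition_eq (m : Nat) (hm : 1 ≤ m) :
    transition (limN m) (limN (m + 1)) = (List.range' (m * m + (m + 1)) m).map fref := by
  unfold transition
  rw [List.range'_eq_map_range, List.map_map]
  rcases Nat.even_or_odd m with ⟨k, hk⟩ | ⟨k, hk⟩ <;> subst hk
  · -- m even: lim = -k < 0 ≤ limN (m+1) = k+1, ascending range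
    have hL : limN (k + k) = -(k : Int) := by
      unfold limN; have h1 : (k + k) % 2 = 0 := by omega
      have h2 : (k + k + 1) / 2 = k := by omega
      simp [h1, h2]
    have hR : limN (k + k + 1) = (k : Int) + 1 := by
      unfold limN; have h1 : (k + k + 1) % 2 = 1 := by omega
      have h2 : (k + k + 1 + 1) / 2 = k + 1 := by omega
      simp [h1, h2]
    rw [hL, hR, if_pos (by omega), PySem.List.foldl_append_singleton_eq_self, List.nil_append,
      PySem.List.pyRange_one]
    apply List.ext_getElem
    · simp; omega
    · intro i hi1 hi2
      simp only [List.getElem_map, List.getElem_range, Function.comp_apply]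
      have hi : i < k + k := by simpa using hi2
      have heq : (k + k) * (k + k) + (k + k + 1) + i = (k + k) * (k + k) + ((k + k) + (i + 1)) := by
        omega
      rw [heq, fref_desc (k + k) (i + 1) (by omega) (by omega), hL]
      have h1 : (k + k) % 2 = 0 := by omega
      simp only [h1, if_pos]
      push_cast; ring
  · -- m odd: lim = k+1 > 0 > ... descending range
    have hL : limN (2 * k + 1) = (k : Int) + 1 := by
      unfold limN; have h1 : (2 * k + 1) % 2 = 1 := by omega
      have h2 : (2 * k + 1 + 1) / 2 = k + 1 := by omega
      simp [h1, h2]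
    have hR : limN (2 * k + 1 + 1) = -((k : Int) + 1) := by
      unfold limN; have h1 : (2 * k + 2) % 2 = 0 := by omega
      have h2 : (2 * k + 2 + 1) / 2 = k + 1 := by omega
      simp [h1, h2]
    rw [hL, hR, if_neg (by omega), PySem.List.foldl_append_singleton_eq_self, List.nil_append,
      PySem.List.pyRange_neg_one]
    apply List.ext_getElem
    · simp; omega
    · intro i hi1 hi2
      simp only [List.getElem_map, List.getElem_range, Function.comp_apply]
      have hi : i < 2 * k + 1 := by simpa using hi2
      have heq : (2*k+1) * (2*k+1) + (2*k+1+1) + i = (2*k+1) * (2*k+1) + ((2*k+1) + (i+1)) := by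
        omega
      rw [heq, fref_desc (2 * k + 1) (i + 1) (by omega) (by omega), hL]
      have h1 : (2 * k + 1) % 2 = 1 := by omega
      simp only [h1]
      norm_num
  
-- one full iteration of A's body turns the fref-prefix of length m² into the one of length (m+1)²
lemma body_eq (m : Nat) (hm : 1 ≤ m) :
    ((List.range (m * m)).map fref ++ List.replicate (((m : Int) + 1)).toNat (limN m)) ++
      transition (limN m) (if 0 < limN m then -(limN m) else -(limN m - 1)) =
      (List.range ((m + 1) * (m + 1))).map fref := by
  rw [newlim_eq m hm, plateau_eq m hm, transition_eq m hm]
  have hsplit : (m + 1) * (m + 1) = m * m + ((m + 1) + m) := by ring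
  rw [hsplit]
  have hra : List.range (m * m + ((m + 1) + m)) = List.range (m * m) ++ List.range' (m * m) ((m + 1) + m) := by
    rw [List.range_eq_range', List.range_eq_range']
    have := @List.range'_append 0 (m * m) ((m + 1) + m) 1
    simpa using this.symm
  have hrb : List.range' (m * m) ((m + 1) + m) = List.range' (m * m) (m + 1) ++ List.range' (m * m + (m + 1)) m := by
    have := @List.range'_append (m * m) (m + 1) m 1
    simpa using this.symm
  rw [hra]
  simp only [List.map_append, List.append_assoc]
  congr 1
  rw [← List.map_append]
  congr 1
  have := @List.range'_append (m * m) (m + 1) m 1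
  simpa using this

-- cgenLoop only depends on the values of its arguments (the 1 ≤ stay proof is irrelevant)
lemma cgenLoop_congr (n : Int) {c c' : List Int} {s s' l l' : Int}
    (hc : c = c') (hs : s = s') (hl : l = l') (h : 1 ≤ s) (h' : 1 ≤ s') :
    cgenLoop n c s l h = cgenLoop n c' s' l' h' := by
  subst hc; subst hs; subst hl; rfl

-- A's loop, started at block m with the fref-prefix of length m², yields a full-block fref-prefix
lemma loopA (n : Int) (m : Nat) (hm : 1 ≤ m) (h1 : 1 ≤ (m : Int) + 1) :
    ∃ M : Nat, n ≤ ((M * M : Nat) : Int) ∧ 1 ≤ M ∧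
      cgenLoop n ((List.range (m * m)).map fref) ((m : Int) + 1) (limN m) h1 =
        (List.range (M * M)).map fref := by
  unfold cgenLoop
  split
  · case isTrue h =>
    have hnext := loopA n (m + 1) (by omega) (by push_cast; omega)
    obtain ⟨M, hM1, hM2, hM3⟩ := hnext
    refine ⟨M, hM1, hM2, ?_⟩
    rw [← hM3]
    exact cgenLoop_congr n (body_eq m hm) (by push_cast; ring) (newlim_eq m hm) _ _
  · case isFalse h =>
    refine ⟨m, ?_, hm, rfl⟩
    simp only [List.length_map, List.length_range] at h
    omega
termination_by (n - ((m * m : Nat) : Int)).toNat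
decreasing_by
  simp only [List.length_map, List.length_range] at *
  have : (m : Int) * m < n := by push_cast at *; omega
  push_cast
  have hmm : ((m:Int)+1) * ((m:Int)+1) > (m:Int)*m := by nlinarith
  omega

-- B's fold over range(k) builds exactly the fref-prefix of length k, tracking m = √(k-1)
lemma sqrt_step (k : Nat) :
    (if ((Nat.sqrt (k - 1) : Int) + 1) * ((Nat.sqrt (k - 1) : Int) + 1) ≤ (k : Int)
      then (Nat.sqrt (k - 1) : Int) + 1 else (Nat.sqrt (k - 1) : Int)) = (Nat.sqrt k : Int) := by
  rcases Nat.eq_zero_or_pos k with rfl | hk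
  · norm_num
  · set s := Nat.sqrt (k - 1) with hs
    have hle : s * s ≤ k - 1 := by
      have h := Nat.sqrt_le' (k - 1); rw [pow_two] at h; exact h
    have hlt : k - 1 < (s + 1) * (s + 1) := by
      have h := Nat.lt_succ_sqrt' (k - 1); rw [pow_two] at h
      simpa [Nat.succ_eq_add_one] using h
    by_cases hc : (s + 1) * (s + 1) ≤ k
    · have hkeq : k = (s + 1) * (s + 1) := by omega
      have heq : Nat.sqrt k = s + 1 := by rw [hkeq, ← pow_two]; exact Nat.sqrt_eq' (s + 1)
      rw [heq, if_pos (by exact_mod_cast hc)]; push_cast; ring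
    · have h1 : s ≤ Nat.sqrt k := Nat.le_sqrt.2 (by omega)
      have h2 : Nat.sqrt k < s + 1 := by rw [Nat.sqrt_lt]; omega
      have heq : Nat.sqrt k = s := by omega
      rw [heq, if_neg (by exact_mod_cast hc)]

lemma altFold (k : Nat) :
    (PySem.List.pyRange 0 (k : Int) 1).foldl cgenAltStep ([], 0) =
      ((List.range k).map fref, (Nat.sqrt (k - 1) : Int)) := by
  induction k with
  | zero => simp [PySem.List.pyRange_one_eq_nil]
  | succ k ih =>
    have hr : PySem.List.pyRange 0 ((k + 1 : Nat) : Int) 1 =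
        PySem.List.pyRange 0 (k : Int) 1 ++ [(k : Int)] := by
      have := PySem.List.pyRange_one_succ_right (a := 0) (b := (k : Int)) (by omega)
      push_cast
      rw [← this]
    rw [hr, List.foldl_append, ih]
    simp only [List.foldl_cons, List.foldl_nil]
    unfold cgenAltStep
    simp only
    rw [sqrt_step k]
    have hel : gval (Nat.sqrt k : Int) (k : Int) = fref k := rfl
    have hsq : Nat.sqrt (k + 1 - 1) = Nat.sqrt k := by norm_num
    unfold gval at hel
    simp only at hel
    rw [hsq]
    refine Prod.ext ?_ rfl
    simp only
    rw [hel, List.range_succ, List.map_append, List.map_cons, List.map_nil]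

-- slicing the fref-prefix of length L to n elements (0 ≤ n ≤ L) is the fref-prefix of length n.toNat
lemma slice_pref (L : Nat) (n : Int) (h0 : 0 ≤ n) (hn : n ≤ (L : Int)) :
    PySem.List.slice ((List.range L).map fref) none (some n) = (List.range n.toNat).map fref := by
  rw [PySem.List.slice_to _ h0, ← List.map_take, List.take_range]
  congr 2
  omega

-- ===== VERDICT (by name: the statement is the Claim_ definition above) =====
theorem cgen_spec : Claim_equal_cgen := by
  intro n _
  unfold Spec_cgen cgen cgen_alt
  by_cases h0 : 0 ≤ n
  · obtain ⟨M, hM1, hM2, hM3⟩ := loopA n 1 (by norm_num) (by norm_num)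
    have hstart : cgenLoop n [0] 2 1 (by norm_num) = (List.range (M * M)).map fref := by
      rw [← hM3]
      exact cgenLoop_congr n (by decide) (by norm_num) (by decide) _ _
    have hn : ((n.toNat : Nat) : Int) = n := by omega
    have hB : (PySem.List.pyRange 0 n 1).foldl cgenAltStep ([], 0) =
        ((List.range n.toNat).map fref, ((Nat.sqrt (n.toNat - 1) : Nat) : Int)) := by
      rw [← hn]; exact altFold n.toNat
    rw [hstart, hB]
    exact slice_pref (M * M) n h0 hM1
  · have hA : cgenLoop n [0] 2 1 (by norm_num) = [0] := by
      unfold cgenLoop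
      rw [dif_neg]
      simp only [List.length_cons, List.length_nil]
      omega
    rw [hA, PySem.List.pyRange_one_eq_nil (by omega)]
    simp only [List.foldl_nil]
    obtain ⟨k, hk1, hk2⟩ : ∃ k : Nat, 0 < k ∧ n = -(k : Int) :=
      ⟨(-n).toNat, by omega, by omega⟩
    rw [hk2, PySem.List.slice_to_neg_natCast _ _ hk1]
    have hz : ([(0 : Int)] : List Int).length - k = 0 := by
      simp only [List.length_cons, List.length_nil]
      omega
    rw [hz, List.take_zero]
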